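-- pv_equiv track=rewrite | github.com/Dan-wanna-M/formatron | src/formatron/formats/utils.py | escape_identifier
-- ===== SOURCE A (Python) =====
-- VALID_IDENTIFIER_CHARACTERS = "0123456789abcdefghijklmnopqrstuvwxyzABCDEFGHIJKLMNOPQRSTUVWXYZ_"
--
-- def escape_identifier(s: str) -> str:
--     """
--     For each character in the string, if it is a valid kbnf identifier character,
--     add it to the result. Otherwise, add its Unicode code point to the result.
--
--     Args:
--         s: The string to escape.
--
--     Returns:
--         The escaped string.
--
--     Examples:
--         >>> escape_identifier("hello")
--         "hello"
--         >>> escape_identifier("hello_world")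
--         "hello_world"
--         >>> escape_identifier("hello world")
--         "hellou20world"
--     """
--     result = []
--     for c in s:
--         if c in VALID_IDENTIFIER_CHARACTERS:
--             result.append(c)
--         else:
--             result.append(f"u{ord(c):x}")
--     return "".join(result)
-- ===== SOURCE B (Python) =====
-- import re
--
-- _INVALID = re.compile(r"[^0-9a-zA-Z_]")
--
--
-- def escape_identifier(s: str) -> str:
--     return _INVALID.sub(lambda m: f"u{ord(m.group()):x}", s)
-- ===== Notes on version B (the rewrite author's own statement) =====
-- stated objective: idiomatic
-- what changed: Replaced the explicit per-character loop with result-list accumulation and final join by a single compiled-regex substitution that touches only the non-identifier characters via a replacement callback.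
import Mathlib
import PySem

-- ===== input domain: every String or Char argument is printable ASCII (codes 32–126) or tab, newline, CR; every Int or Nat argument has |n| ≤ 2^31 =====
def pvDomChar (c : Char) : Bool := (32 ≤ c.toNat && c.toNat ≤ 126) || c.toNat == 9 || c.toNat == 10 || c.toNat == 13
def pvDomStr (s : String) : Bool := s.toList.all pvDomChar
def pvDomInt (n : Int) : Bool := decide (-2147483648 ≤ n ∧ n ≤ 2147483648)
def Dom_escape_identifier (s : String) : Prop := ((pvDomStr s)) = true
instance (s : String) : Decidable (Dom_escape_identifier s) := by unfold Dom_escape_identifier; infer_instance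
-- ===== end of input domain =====

-- B replaces A's explicit loop-and-join with a single regex substitution over the
-- non-identifier characters (same result; objective: idiomatic).

-- ===== PORT A =====
-- VALID_IDENTIFIER_CHARACTERS
def validIdentifierCharacters : List Char :=
  "0123456789abcdefghijklmnopqrstuvwxyzABCDEFGHIJKLMNOPQRSTUVWXYZ_".toList

-- f"u{ord(c):x}"  (lowercase hex, no zero-padding): Nat.toDigits 16 is exactly {:x}
def hexEscape (c : Char) : List Char := 'u' :: Nat.toDigits 16 c.toNat

def escape_identifier (s : String) : String :=
  -- result = []; for c in s: append c, or append f"u{ord(c):x}"; return "".join(result)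
  PySem.Str.join "" (s.toList.foldl (fun r c =>
    if PySem.Chars.isIn [c] validIdentifierCharacters then r ++ [String.ofList [c]]
    else r ++ [String.ofList (hexEscape c)]) [])

-- ===== PORT B =====
-- re.sub(r"[^0-9a-zA-Z_]", lambda m: f"u{ord(m.group()):x}", s): each char outside the
-- one-char class [0-9a-zA-Z_] is replaced by the callback's string, the rest stay.
def escape_identifier_alt (s : String) : String :=
  String.ofList (s.toList.flatMap (fun c =>
    if c.isAlphanum || c == '_' then [c] else hexEscape c))

-- ===== PRECONDITION & SPEC =====
def Spec_escape_identifier (s : String) (out : String) : Prop := out = escape_identifier_alt s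
instance (s : String) (out : String) : Decidable (Spec_escape_identifier s out) := by unfold Spec_escape_identifier; infer_instance

-- ===== CLAIM (what is proved, stated in full; the proofs are below) =====
def Claim_equal_escape_identifier : Prop := ∀ (s : String), Dom_escape_identifier s → Spec_escape_identifier s (escape_identifier s)

-- ===== LEMMAS AND PROOFS =====

lemma singleton_infix {α : Type} (c : α) (l : List α) : [c] <:+: l ↔ c ∈ l := by
  constructor
  · intro h; exact h.sublist.subset (by simp)
  · intro h
    rcases List.append_of_mem h with ⟨p, q, rfl⟩
    exact ⟨p, q, by simp⟩

-- the two character classifiers agree on every domain character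
lemma mem_valid (c : Char) (h : pvDomChar c = true) :
    decide (c ∈ validIdentifierCharacters) = (c.isAlphanum || c == '_') := by
  have hlt : c.toNat < 128 := by simp [pvDomChar] at h; omega
  have h2 := Char.ofNat_toNat c
  generalize hg : c.toNat = n at hlt h2
  rw [← h2]
  interval_cases n <;> decide

lemma test_eq (c : Char) (h : pvDomChar c = true) :
    PySem.Chars.isIn [c] validIdentifierCharacters = (c.isAlphanum || c == '_') := by
  rw [← mem_valid c h]
  have h1 : PySem.Chars.isIn [c] validIdentifierCharacters = true ↔
      c ∈ validIdentifierCharacters :=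
    (PySem.Chars.isIn_iff_infix _ _).trans (singleton_infix c _)
  by_cases hm : c ∈ validIdentifierCharacters
  · simp [hm, h1.mpr hm]
  · simp only [hm, decide_false]
    exact Bool.eq_false_iff.mpr (fun hc => hm (h1.mp hc))

lemma piece_eq (c : Char) (h : pvDomChar c = true) :
    (if PySem.Chars.isIn [c] validIdentifierCharacters then String.ofList [c]
     else String.ofList (hexEscape c)).toList
    = (if c.isAlphanum || c == '_' then [c] else hexEscape c) := by
  rw [test_eq c h]
  split <;> simp [String.toList_ofList]

lemma join_empty (l : List (List Char)) : PySem.Chars.join [] l = l.flatten := by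
  induction l with
  | nil => rfl
  | cons a t ih =>
    cases t with
    | nil => simp [PySem.Chars.join_singleton]
    | cons b r => simpa [PySem.Chars.join_cons_cons] using ih

-- ===== VERDICT (by name: the statement is the Claim_ definition above) =====
theorem escape_identifier_spec : Claim_equal_escape_identifier := by
  intro s hdom
  have hall : ∀ c ∈ s.toList, pvDomChar c = true := by
    simpa [Dom_escape_identifier, pvDomStr, List.all_eq_true] using hdom
  unfold Spec_escape_identifier escape_identifier escape_identifier_alt
  have hf : (fun (r : List String) c =>
      if PySem.Chars.isIn [c] validIdentifierCharacters then r ++ [String.ofList [c]]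
      else r ++ [String.ofList (hexEscape c)])
      = (fun (r : List String) c => r ++
        [if PySem.Chars.isIn [c] validIdentifierCharacters then String.ofList [c]
         else String.ofList (hexEscape c)]) := by
    funext r c; split <;> rfl
  rw [hf, PySem.List.foldl_append_singleton_eq_map]
  rw [← String.toList_inj]
  simp only [PySem.Str.toList_join, List.nil_append, List.map_map, String.toList_ofList]
  rw [show ("" : String).toList = ([] : List Char) from rfl, join_empty, List.flatMap_def]
  congr 1
  refine List.map_congr_left ?_
  intro c hc
  simpa using piece_eq c (hall c hc)
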